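-- pv_equiv track=rewrite | github.com/Purinat33/Data-Communication-Error-Checking | checksum.py | Checksum_gen
-- ===== SOURCE A (Python) =====
-- def Checksum_gen(datawords, num_blocks):
--     # Concatenate the datawords
--     concatenated_datawords = ''.join(datawords)
--
--     # Divide the concatenated datawords into blocks
--     block_size = len(concatenated_datawords) // num_blocks
--     blocks = [concatenated_datawords[i:i+block_size] for i in range(0, len(concatenated_datawords), block_size)]
--
--     # Calculate the checksum
--     checksum = ''
--     for i in range(block_size):
--         total = 0
--         for block in blocks:
--             total += int(block[i], 2)
--         checksum += str(total % 2)
--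
--     # Combine the datawords and checksum to form the codeword
--     codeword = concatenated_datawords + checksum
--     return codeword
-- ===== SOURCE B (Python) =====
-- def Checksum_gen(datawords, num_blocks):
--     # Single pass over the concatenated bits: a per-column accumulator indexed
--     # by position mod block_size replaces A's slicing into blocks and its
--     # column-major nested loop.
--     s = ''.join(datawords)
--     block_size = len(s) // num_blocks
--     if block_size <= 0:
--         return s
--     counts = [0] * block_size
--     for j, ch in enumerate(s):
--         counts[j % block_size] += int(ch, 2)
--     return s + ''.join(str(c % 2) for c in counts)
-- ===== Notes on version B (the rewrite author's own statement) =====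
-- stated objective: simpler
-- what changed: Drops the block-slicing list and the column-major nested loop entirely: B makes one pass over the concatenated string, accumulating each bit into counts[position mod block_size], then joins the parities.
import Mathlib
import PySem

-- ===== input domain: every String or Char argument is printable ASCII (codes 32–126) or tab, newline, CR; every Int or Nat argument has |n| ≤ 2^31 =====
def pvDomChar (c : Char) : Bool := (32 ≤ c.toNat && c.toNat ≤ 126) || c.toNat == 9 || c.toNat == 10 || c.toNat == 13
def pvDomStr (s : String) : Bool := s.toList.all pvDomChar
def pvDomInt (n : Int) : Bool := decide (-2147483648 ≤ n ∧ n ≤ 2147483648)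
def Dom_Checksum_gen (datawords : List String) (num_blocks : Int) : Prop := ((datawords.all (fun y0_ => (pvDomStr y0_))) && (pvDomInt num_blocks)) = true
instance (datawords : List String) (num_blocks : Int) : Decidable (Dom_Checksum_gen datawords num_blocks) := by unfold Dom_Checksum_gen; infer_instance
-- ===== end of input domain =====

-- B replaces A's block-slicing list and column-major nested loop by one pass over the
-- concatenated string with a counts accumulator indexed by position mod block_size (objective: simpler).

-- ===== PORT A =====
-- int(oc, 2) applied to the Option result of block[i]: none (IndexError / ValueError) is excluded by Pre_
def pvInt2A (oc : Option Char) : Int := ((oc.bind (fun c => PySem.Int.ofCharsBase? [c] 2)).getD 0)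

def Checksum_gen (datawords : List String) (num_blocks : Int) : String :=
  let cs : List Char := PySem.Chars.join [] (datawords.map String.toList)  -- ''.join(datawords)
  let L : Int := PySem.Chars.len cs
  let bs : Int := PySem.Int.floordiv L num_blocks  -- num_blocks = 0 raises ZeroDivisionError: excluded by Pre_
  -- blocks = [cs[i:i+bs] for i in range(0, L, bs)]; bs = 0 raises ValueError: excluded by Pre_
  let blocks : List (List Char) := (PySem.List.pyRange 0 L bs).map (fun i => PySem.List.slice cs (some i) (some (i + bs)))
  let checksum : List Char := (PySem.List.pyRange 0 bs 1).foldl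
    (fun acc i => acc ++ PySem.Int.toChars (PySem.Int.mod
      (blocks.foldl (fun t b => t + pvInt2A (PySem.List.pyGet? b i)) 0) 2)) []
  String.ofList (cs ++ checksum)

-- ===== PORT B =====
-- int(ch, 2) on a single char: none (ValueError) is excluded by Pre_
def pvInt2B (c : Char) : Int := (PySem.Int.ofCharsBase? [c] 2).getD 0

def Checksum_gen_alt (datawords : List String) (num_blocks : Int) : String :=
  let cs : List Char := PySem.Chars.join [] (datawords.map String.toList)
  let bs : Int := PySem.Int.floordiv (PySem.Chars.len cs) num_blocks  -- num_blocks = 0 raises: excluded by Pre_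
  if bs ≤ 0 then String.ofList cs
  else
    let counts : List Int :=
      (PySem.List.enumerate cs 0).foldl
        (fun counts p =>
          counts.set (PySem.Int.mod p.1 bs).toNat
            (counts.getD (PySem.Int.mod p.1 bs).toNat 0 + pvInt2B p.2))
        (List.replicate bs.toNat 0)
    String.ofList (cs ++ PySem.Chars.join [] (counts.map (fun c => PySem.Int.toChars (PySem.Int.mod c 2))))

-- ===== PRECONDITION & SPEC =====
-- helpers for the input-side conditions (closed-form, independent of the ports)
def pvCat (datawords : List String) : List Char := PySem.Chars.join [] (datawords.map String.toList)
def pvBS (datawords : List String) (num_blocks : Int) : Int :=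
  PySem.Int.floordiv (PySem.Chars.len (pvCat datawords)) num_blocks

-- A returns normally iff: num_blocks ≠ 0 (else ZeroDivisionError), block_size ≠ 0 (else ValueError from
-- range step 0), and when block_size > 0 it divides the data length (else IndexError on the ragged last
-- block) and every character is a binary digit (else ValueError from int(ch, 2)).
def Pre_Checksum_gen (datawords : List String) (num_blocks : Int) : Prop :=
  num_blocks ≠ 0 ∧ pvBS datawords num_blocks ≠ 0 ∧
    (0 < pvBS datawords num_blocks →
      PySem.Int.mod (PySem.Chars.len (pvCat datawords)) (pvBS datawords num_blocks) = 0 ∧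
      (pvCat datawords).all (fun c => c == '0' || c == '1') = true)
instance (datawords : List String) (num_blocks : Int) : Decidable (Pre_Checksum_gen datawords num_blocks) := by
  unfold Pre_Checksum_gen; infer_instance

def pvWitness_Checksum_gen : List String × Int := (["1011", "0110"], 2)

def Spec_Checksum_gen (datawords : List String) (num_blocks : Int) (out : String) : Prop :=
  out = Checksum_gen_alt datawords num_blocks
instance (datawords : List String) (num_blocks : Int) (out : String) : Decidable (Spec_Checksum_gen datawords num_blocks out) := by
  unfold Spec_Checksum_gen; infer_instance

-- ===== CLAIM (what is proved, stated in full; the proofs are below) =====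
def Claim_equal_Checksum_gen : Prop := ∀ (datawords : List String) (num_blocks : Int), Dom_Checksum_gen datawords num_blocks → Pre_Checksum_gen datawords num_blocks → Spec_Checksum_gen datawords num_blocks (Checksum_gen datawords num_blocks)
-- ===== LEMMAS AND PROOFS =====

-- B's loop body with block size n (the fixed value of bs in the positive case)
def pvStep (n : Nat) (counts : List Int) (p : Int × Char) : List Int :=
  counts.set (PySem.Int.mod p.1 (n : Int)).toNat
    (counts.getD (PySem.Int.mod p.1 (n : Int)).toNat 0 + pvInt2B p.2)

-- ''.join over a list of char-lists is flatten
theorem pvJoinNil (lss : List (List Char)) : PySem.Chars.join [] lss = lss.flatten := by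
  induction lss with
  | nil => rfl
  | cons a l ih =>
      cases l with
      | nil => simp [PySem.Chars.join, List.intercalate, List.intersperse]
      | cons b m =>
          simp only [PySem.Chars.join, List.intercalate] at *
          simp [List.intersperse] at *
          simp_all

-- A's block list in closed form: the n-chunks of cs
theorem pvBlocksEq (cs : List Char) (n q : Nat) (hn : 0 < n) (hL : cs.length = q * n) :
    (PySem.List.pyRange 0 (cs.length : Int) (n : Int)).map
        (fun i => PySem.List.slice cs (some i) (some (i + (n : Int))))
      = (List.range q).map (fun k => (cs.drop (k * n)).take n) := by
  have hstep : (0:Int) < (n:Int) := by exact_mod_cast hn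
  rw [PySem.List.pyRange_of_pos 0 (cs.length : Int) hstep]
  rw [List.map_map]
  have hcount : (if (0:Int) < (cs.length:Int) then (((cs.length:Int) - 0 + n - 1) / n).toNat else 0) = q := by
    rcases Nat.eq_zero_or_pos q with hq | hq
    · simp [hL, hq]
    · have hpos : (0:Int) < (cs.length:Int) := by
        have : 0 < cs.length := by rw [hL]; positivity
        exact_mod_cast this
      rw [if_pos hpos]
      have h1 : (cs.length:Int) - 0 + n - 1 = (((n - 1) + q * n : Nat) : Int) := by
        rw [hL]; push_cast [Nat.cast_sub (show 1 ≤ n by omega)]; omega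
      rw [h1, ← Int.natCast_div, Nat.add_mul_div_right _ _ hn, Nat.div_eq_of_lt (by omega)]
      simp
  rw [hcount]
  apply List.map_congr_left
  intro k hk
  simp only [Function.comp]
  have : (0 : Int) + (n:Int) * (k:Int) = ((k*n : Nat) : Int) := by push_cast; ring
  rw [this]
  rw [PySem.List.slice_natCast_add cs (k*n) n]

-- processing the tail of one block (within-block offset t) updates exactly slots t..n-1
theorem pvBlockStep (n : Nat) (b : List Char) :
    ∀ (t m : Nat) (counts : List Int), counts.length = n → t + b.length = n →
    (PySem.List.enumerate b ((m * n + t : Nat) : Int)).foldl (pvStep n) counts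
      = counts.take t ++ List.zipWith (fun c ch => c + pvInt2B ch) (counts.drop t) b := by
  induction b with
  | nil =>
      intro t m counts hc ht
      have : t = n := by simpa using ht
      simp [PySem.List.enumerate, List.drop_eq_nil_of_le (by omega : counts.length ≤ t),
        List.take_of_length_le (by omega : counts.length ≤ t)]
  | cons ch b ih =>
      intro t m counts hc ht
      have htn : t < n := by simp at ht; omega
      rw [PySem.List.enumerate_cons]
      rw [List.foldl_cons]
      have hmod : (PySem.Int.mod ((m * n + t : Nat) : Int) (n : Int)).toNat = t := by
        rw [PySem.Int.mod_natCast]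
        simp [Nat.mod_eq_of_lt htn]
      have hset : pvStep n counts ((m * n + t : Nat), ch)
          = counts.take t ++ (counts.getD t 0 + pvInt2B ch) :: counts.drop (t + 1) := by
        simp only [pvStep, hmod]
        rw [List.set_eq_take_append_cons_drop]
        rw [if_pos (by omega)]
      rw [hset]
      have hlen : (counts.take t ++ (counts.getD t 0 + pvInt2B ch) :: counts.drop (t + 1)).length = n := by
        simp; omega
      have hoff : ((m * n + t : Nat) : Int) + 1 = ((m * n + (t+1) : Nat) : Int) := by push_cast; ring
      rw [hoff, ih (t+1) m _ hlen (by simp at ht ⊢; omega)]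
      -- now both sides are appends; compute take/drop of the rebuilt list
      have h1 : (counts.take t ++ (counts.getD t 0 + pvInt2B ch) :: counts.drop (t + 1)).take (t+1)
          = counts.take t ++ [counts.getD t 0 + pvInt2B ch] := by
        rw [List.take_append]
        simp [List.length_take, Nat.min_eq_left (by omega : t ≤ counts.length), List.take_take]
      have h2 : (counts.take t ++ (counts.getD t 0 + pvInt2B ch) :: counts.drop (t + 1)).drop (t+1)
          = counts.drop (t + 1) := by
        rw [List.drop_append]
        simp [List.length_take, Nat.min_eq_left (by omega : t ≤ counts.length)]
      rw [h1, h2]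
      have hdrop : counts.drop t = counts[t] :: counts.drop (t+1) := by
        rw [List.drop_eq_getElem_cons (by omega)]
      rw [hdrop, List.zipWith_cons_cons]
      simp [List.append_assoc, List.getD, List.getElem?_eq_getElem (show t < counts.length by omega)]

-- the whole pass over cs = q full blocks, starting at any block boundary
theorem pvPassEq (n : Nat) :
    ∀ (q : Nat) (cs : List Char) (m : Nat) (counts : List Int),
      counts.length = n → cs.length = q * n →
    (PySem.List.enumerate cs ((m * n : Nat) : Int)).foldl (pvStep n) counts
      = (List.range n).map (fun i =>
          counts.getD i 0 + ((List.range q).map (fun k => pvInt2B (cs.getD (k * n + i) '0'))).sum) := by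
  intro q
  induction q with
  | zero =>
      intro cs m counts hc hL
      have : cs = [] := List.eq_nil_of_length_eq_zero (by omega)
      subst this
      simp only [PySem.List.enumerate, List.foldl_nil, List.range_zero, List.map_nil, List.sum_nil, add_zero]
      refine List.ext_getElem (by simp [hc]) ?_
      intro i h1 h2
      simp [List.getElem?_eq_getElem h1]
  | succ q ih =>
      intro cs m counts hc hL
      have hsplit : cs = cs.take n ++ cs.drop n := (List.take_append_drop n cs).symm
      conv_lhs => rw [hsplit]
      rw [PySem.List.enumerate_append, List.foldl_append]
      have htlen : (cs.take n).length = n := by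
        rw [List.length_take, hL]
        exact Nat.min_eq_left (Nat.le_mul_of_pos_left n (Nat.succ_pos q))
      have hfirst := pvBlockStep n (cs.take n) 0 m counts hc (by simp [htlen])
      simp only [Nat.add_zero] at hfirst
      rw [hfirst]
      simp only [List.take_zero, List.drop_zero, List.nil_append]
      have hzlen : (List.zipWith (fun c ch => c + pvInt2B ch) counts (cs.take n)).length = n := by
        simp [htlen, hc]
      have hoff : ((m * n : Nat) : Int) + ((cs.take n).length : Int) = (((m+1) * n : Nat) : Int) := by
        rw [htlen]; push_cast; ring
      rw [hoff, ih (cs.drop n) (m+1) _ hzlen (by rw [List.length_drop, hL, Nat.succ_mul]; omega)]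
      apply List.map_congr_left
      intro i hi
      have hi' : i < n := List.mem_range.mp hi
      have hz : (List.zipWith (fun c ch => c + pvInt2B ch) counts (cs.take n)).getD i 0
          = counts.getD i 0 + pvInt2B (cs.getD i '0') := by
        have hi3 : i < cs.length := by rw [hL, Nat.succ_mul]; omega
        rw [List.getD_eq_getElem _ 0 (by rw [hzlen]; exact hi'), List.getElem_zipWith,
          List.getD_eq_getElem _ 0 (by omega), List.getD_eq_getElem _ '0' hi3]
        congr 1
        exact congrArg pvInt2B List.getElem_take
      rw [hz, List.range_succ_eq_map, List.map_cons, List.sum_cons, List.map_map]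
      have hfirstterm : pvInt2B (cs.getD (0 * n + i) '0') = pvInt2B (cs.getD i '0') := by
        norm_num
      have hrest : ∀ k ∈ List.range q,
          ((fun k => pvInt2B (cs.getD (k * n + i) '0')) ∘ Nat.succ) k
            = pvInt2B ((cs.drop n).getD (k * n + i) '0') := by
        intro k _
        simp only [Function.comp, Nat.succ_eq_add_one]
        congr 1
        rw [List.getD, List.getD, List.getElem?_drop]
        have : (k+1) * n + i = n + (k * n + i) := by ring
        rw [this]
      rw [List.map_congr_left hrest, hfirstterm]
      ring


theorem pvMain (datawords : List String) (num_blocks : Int) (hpre : Pre_Checksum_gen datawords num_blocks) :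
    Checksum_gen datawords num_blocks = Checksum_gen_alt datawords num_blocks := by
  obtain ⟨hnb, hbs0, hbin⟩ := hpre
  unfold pvBS pvCat at hbs0 hbin
  simp only [PySem.Chars.len_eq] at hbs0 hbin
  simp only [Checksum_gen, Checksum_gen_alt, PySem.Chars.len_eq]
  set cs : List Char := PySem.Chars.join [] (datawords.map String.toList) with hcs
  set bs : Int := PySem.Int.floordiv (cs.length : Int) num_blocks with hbsdef
  rcases lt_or_gt_of_ne hbs0 with hneg | hpos
  · -- bs < 0: no blocks, empty checksum on both sides
    rw [PySem.List.pyRange_one_eq_nil (le_of_lt hneg), if_pos (le_of_lt hneg)]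
    simp
  · -- 0 < bs
    rw [if_neg (not_le.mpr hpos)]
    set n : Nat := bs.toNat with hndef
    have hn : 0 < n := by omega
    have hbsn : bs = (n : Int) := by omega
    have hdvd : n ∣ cs.length := by
      have hm := (hbin hpos).1
      rw [PySem.Int.mod_eq_zero_iff_dvd, hbsn] at hm
      exact_mod_cast hm
    obtain ⟨q, hq⟩ := hdvd
    have hL : cs.length = q * n := by rw [hq]; ring
    rw [hbsn]
    rw [pvBlocksEq cs n q hn hL]
    rw [PySem.List.foldl_append_eq_flatMap
      (fun i => PySem.Int.toChars (PySem.Int.mod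
        (((List.range q).map (fun k => (cs.drop (k * n)).take n)).foldl
          (fun t b => t + pvInt2A (PySem.List.pyGet? b i)) 0) 2))]
    rw [List.nil_append]
    -- B side: the loop is pvStep n over the enumeration
    rw [show PySem.List.enumerate cs 0 = PySem.List.enumerate cs ((0 * n : Nat) : Int) by norm_num]
    rw [show (fun (counts : List Int) (p : Int × Char) =>
          counts.set (PySem.Int.mod p.1 (n : Int)).toNat
            (counts.getD (PySem.Int.mod p.1 (n : Int)).toNat 0 + pvInt2B p.2)) = pvStep n from rfl]
    rw [pvPassEq n q cs 0 (List.replicate n 0) (by simp) hL]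
    rw [pvJoinNil, List.map_map, ← List.flatMap_def]
    -- A side: range over Int indices
    rw [PySem.List.pyRange_one]
    simp only [zero_add, sub_zero, Int.toNat_natCast]
    congr 1
    congr 1
    simp only [List.flatMap_def, List.map_map]
    apply congrArg List.flatten
    apply List.map_congr_left
    intro k hk
    have hk' : k < n := List.mem_range.mp hk
    simp only [Function.comp]
    congr 1
    congr 1
    -- column k: A's fold over the blocks = B's accumulated count
    rw [PySem.List.foldl_add]
    rw [List.map_map]
    have hgd : (List.replicate n (0:Int)).getD k 0 = 0 := by
      simp [List.getD, hk']
    rw [hgd]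
    apply congrArg (fun x => 0 + x)
    apply congrArg List.sum
    apply List.map_congr_left
    intro j hj
    have hj' : j < q := List.mem_range.mp hj
    simp only [Function.comp]
    have hidx : j * n + k < cs.length := by
      have h1 : (j + 1) * n ≤ q * n := Nat.mul_le_mul_right n (by omega)
      have h2 : j * n + n = (j + 1) * n := by ring
      omega
    rw [PySem.List.pyGet?_natCast, List.getElem?_take, if_pos hk', List.getElem?_drop,
      List.getElem?_eq_getElem hidx, List.getD_eq_getElem _ '0' hidx]
    rfl

-- ===== VERDICT (by name: the statement is the Claim_ definition above) =====
theorem Checksum_gen_spec : Claim_equal_Checksum_gen := by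
  intro datawords num_blocks _ hpre
  exact pvMain datawords num_blocks hpre
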